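-- pv_equiv track=rewrite | github.com/Nighty3098/ProxySniffer | src/parsers.py | parse_proxy
-- ===== SOURCE A (Python) =====
-- def parse_proxy(proxy: str) -> str:
--     proxy = proxy.strip()
--     for prefix in (
--         "http://",
--         "https://",
--         "socks4://",
--         "socks5://",
--         "socks4h://",
--         "socks5h://",
--     ):
--         if proxy.lower().startswith(prefix):
--             return proxy[len(prefix) :].strip()
--     return proxy
-- ===== SOURCE B (Python) =====
-- def parse_proxy(proxy: str) -> str:
--     s = proxy.strip()
--     idx = s.find("://")
--     if idx != -1 and s[:idx].lower() in ("http", "https", "socks4", "socks5", "socks4h", "socks5h"):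
--         return s[idx + 3:].strip()
--     return s
-- ===== Notes on version B (the rewrite author's own statement) =====
-- stated objective: simpler
-- what changed: Replaces A's six-iteration prefix loop (each iteration lowercasing the whole string and testing startswith) with a single search for the scheme separator plus one membership test of the lowercased scheme name; the remainder is sliced once after the separator.
import Mathlib
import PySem

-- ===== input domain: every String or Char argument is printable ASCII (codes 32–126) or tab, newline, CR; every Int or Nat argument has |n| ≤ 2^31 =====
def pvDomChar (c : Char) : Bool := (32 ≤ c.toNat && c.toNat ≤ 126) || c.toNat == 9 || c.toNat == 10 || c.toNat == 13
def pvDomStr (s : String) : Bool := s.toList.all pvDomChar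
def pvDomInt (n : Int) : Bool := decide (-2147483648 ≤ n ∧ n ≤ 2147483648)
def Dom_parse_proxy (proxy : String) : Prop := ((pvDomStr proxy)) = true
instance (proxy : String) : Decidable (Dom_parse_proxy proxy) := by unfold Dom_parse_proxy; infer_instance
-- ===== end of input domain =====

-- B replaces A's six-iteration prefix loop with one search for the scheme separator plus a scheme-set membership test (objective: simpler).

-- ===== PORT A =====
def pvPrefixes : List String :=
  ["http://", "https://", "socks4://", "socks5://", "socks4h://", "socks5h://"]

def parse_proxy_go (s : String) : List String → String
  | [] => s
  | p :: ps =>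
    if PySem.Str.startswith (PySem.Str.lower s) p = true then
      PySem.Str.strip (PySem.Str.slice s (some (PySem.Str.len p)) none)
    else parse_proxy_go s ps

def parse_proxy (proxy : String) : String :=
  parse_proxy_go (PySem.Str.strip proxy) pvPrefixes

-- ===== PORT B =====
def pvSchemes : List String := ["http", "https", "socks4", "socks5", "socks4h", "socks5h"]

def parse_proxy_alt (proxy : String) : String :=
  let s := PySem.Str.strip proxy
  let idx := PySem.Str.find s "://"
  if idx ≠ -1 ∧ pvSchemes.contains (PySem.Str.lower (PySem.Str.slice s none (some idx))) = true then
    PySem.Str.strip (PySem.Str.slice s (some (idx + 3)) none)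
  else s

-- ===== PRECONDITION & SPEC =====
def Spec_parse_proxy (proxy : String) (out : String) : Prop := out = parse_proxy_alt proxy
instance (proxy : String) (out : String) : Decidable (Spec_parse_proxy proxy out) := by unfold Spec_parse_proxy; infer_instance

-- ===== CLAIM (what is proved, stated in full; the proofs are below) =====
def Claim_equal_parse_proxy : Prop := ∀ (proxy : String), Dom_parse_proxy proxy → Spec_parse_proxy proxy (parse_proxy proxy)

-- ===== LEMMAS AND PROOFS =====

-- B's body after the lets are substituted (definitionally equal to parse_proxy_alt).
def pvBif (s : String) : String :=
  if PySem.Str.find s "://" ≠ -1 ∧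
      pvSchemes.contains (PySem.Str.lower (PySem.Str.slice s none (some (PySem.Str.find s "://")))) = true then
    PySem.Str.strip (PySem.Str.slice s (some (PySem.Str.find s "://" + 3)) none)
  else s

theorem alt_eq (proxy : String) : parse_proxy_alt proxy = pvBif (PySem.Str.strip proxy) := rfl

theorem strfind_eq (s : String) :
    PySem.Str.find s "://" = PySem.Chars.find s.toList [':', '/', '/'] := by
  simp [PySem.Str.find]

-- ':' and '/' are not produced by lowercasing any other character.
theorem lowerChar_sep {c d : Char} (hd : d = ':' ∨ d = '/')
    (h : PySem.Chars.lowerChar c = d) : c = d := by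
  unfold PySem.Chars.lowerChar at h
  split at h
  · exfalso
    rename_i hu
    unfold PySem.Chars.isupper at hu
    rw [Bool.and_eq_true, decide_eq_true_eq, decide_eq_true_eq] at hu
    obtain ⟨ha, hb⟩ := hu
    rw [Char.le_def] at ha hb
    have hlo : 65 ≤ c.toNat := ha
    have hhi : c.toNat ≤ 90 := hb
    have hv : (c.toNat + 32).isValidChar := Or.inl (by omega)
    have h2 := congrArg Char.toNat h
    rw [Char.toNat_ofNat, if_pos hv] at h2
    rcases hd with rfl | rfl
    · rw [show ((':' : Char).toNat) = 58 from rfl] at h2; omega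
    · rw [show (('/' : Char).toNat) = 47 from rfl] at h2; omega
  · exact h

theorem sep_decode {u : List Char} (h : PySem.Chars.lower u = [':', '/', '/']) :
    u = [':', '/', '/'] := by
  rcases u with _ | ⟨a, _ | ⟨b, _ | ⟨c, _ | ⟨d, r⟩⟩⟩⟩ <;> simp [PySem.Chars.lower] at h
  obtain ⟨h1, h2, h3⟩ := h
  rw [lowerChar_sep (Or.inl rfl) h1, lowerChar_sep (Or.inr rfl) h2, lowerChar_sep (Or.inr rfl) h3]

-- If A's prefix test fires for scheme++"://", the first occurrence of "://" is at scheme.length.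
theorem fire {t scheme : List Char} (hc : (':' : Char) ∉ scheme)
    (h : PySem.Chars.startswith (PySem.Chars.lower t) (scheme ++ [':', '/', '/']) = true) :
    PySem.Chars.find t [':', '/', '/'] = (scheme.length : Int) ∧
      PySem.Chars.lower (t.take scheme.length) = scheme := by
  rw [PySem.Chars.startswith_iff] at h
  obtain ⟨r, hr⟩ := h
  have hr' : t.map PySem.Chars.lowerChar = scheme ++ ([':', '/', '/'] ++ r) := by
    rw [← List.append_assoc]
    exact hr.symm
  rw [List.map_eq_append_iff] at hr'
  obtain ⟨u, vw, hu, hmu, hmvw⟩ := hr'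
  rw [List.map_eq_append_iff] at hmvw
  obtain ⟨v, w, hvw, hmv, hmw⟩ := hmvw
  have hv : v = [':', '/', '/'] := sep_decode hmv
  subst hv hvw hu
  have hlen : u.length = scheme.length := by rw [← hmu, List.length_map]
  have hocc : [':', '/', '/'] <+: List.drop u.length (u ++ ([':', '/', '/'] ++ w)) := by
    rw [List.drop_left]
    exact ⟨w, rfl⟩
  have hmin : ∀ i < u.length, ¬ [':', '/', '/'] <+: List.drop i (u ++ ([':', '/', '/'] ++ w)) := by
    intro i hi hpre
    obtain ⟨s', hs'⟩ := hpre
    have h0 : (u ++ ([':', '/', '/'] ++ w))[i]? = some ':' := by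
      have h00 := congrArg (·[0]?) hs'
      simp only [List.getElem?_drop] at h00
      simpa using h00.symm
    rw [List.getElem?_append_left hi] at h0
    have hmem : (':' : Char) ∈ u := List.mem_of_getElem? h0
    have : (':' : Char) ∈ scheme := by
      rw [← hmu]
      have := List.mem_map_of_mem (f := PySem.Chars.lowerChar) hmem
      simpa using this
    exact hc this
  have hinf : [':', '/', '/'] <:+: (u ++ ([':', '/', '/'] ++ w)) := ⟨u, w, by simp⟩
  have hnn : 0 ≤ PySem.Chars.find (u ++ ([':', '/', '/'] ++ w)) [':', '/', '/'] :=
    (PySem.Chars.find_nonneg_iff _ _).2 hinf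
  obtain ⟨hp, hm⟩ := PySem.Chars.find_spec hnn
  have hk : (PySem.Chars.find (u ++ ([':', '/', '/'] ++ w)) [':', '/', '/']).toNat = u.length := by
    rcases Nat.lt_trichotomy (PySem.Chars.find (u ++ ([':', '/', '/'] ++ w)) [':', '/', '/']).toNat u.length with hlt | heq | hgt
    · exact absurd hp (hmin _ hlt)
    · exact heq
    · exact absurd hocc (hm _ hgt)
  constructor
  · rw [← hlen, ← hk, Int.toNat_of_nonneg hnn]
  · rw [← hlen, List.take_left]
    exact hmu

-- Conversely: "://" first at scheme.length and the head lowercases to scheme ⇒ A's prefix test fires.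
theorem refire {t scheme : List Char}
    (hf : PySem.Chars.find t [':', '/', '/'] = (scheme.length : Int))
    (hl : PySem.Chars.lower (t.take scheme.length) = scheme) :
    PySem.Chars.startswith (PySem.Chars.lower t) (scheme ++ [':', '/', '/']) = true := by
  have hnn : 0 ≤ PySem.Chars.find t [':', '/', '/'] := by rw [hf]; exact Int.natCast_nonneg _
  obtain ⟨hp, -⟩ := PySem.Chars.find_spec hnn
  rw [hf] at hp
  simp only [Int.toNat_natCast] at hp
  obtain ⟨w, hw⟩ := hp
  rw [PySem.Chars.startswith_iff]
  refine ⟨PySem.Chars.lower w, ?_⟩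
  have ht : t = t.take scheme.length ++ ([':', '/', '/'] ++ w) := by
    rw [hw, List.take_append_drop]
  conv_rhs => rw [ht]
  simp only [PySem.Chars.lower, List.map_append] at hl ⊢
  rw [hl]
  simp [show PySem.Chars.lowerChar ':' = ':' from rfl,
    show PySem.Chars.lowerChar '/' = '/' from rfl]

theorem case_back (s : String) {scheme : List Char} (p : String)
    (hp : p.toList = scheme ++ [':', '/', '/'])
    (hf : PySem.Str.find s "://" = (scheme.length : Int))
    (hl : PySem.Chars.lower (s.toList.take scheme.length) = scheme) :
    PySem.Str.startswith (PySem.Str.lower s) p = true := by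
  have h := refire (t := s.toList) (by rw [← strfind_eq]; exact hf) hl
  simpa [hp] using h

theorem case_fire (s : String) {scheme : List Char} (p : String)
    (hp : p.toList = scheme ++ [':', '/', '/']) (hc : (':' : Char) ∉ scheme)
    (hmem : pvSchemes.contains (String.ofList scheme) = true)
    (h : PySem.Str.startswith (PySem.Str.lower s) p = true) :
    pvBif s = PySem.Str.strip (PySem.Str.slice s (some (PySem.Str.len p)) none) := by
  have h' : PySem.Chars.startswith (PySem.Chars.lower s.toList) (scheme ++ [':', '/', '/']) = true := by
    simpa [hp] using h
  obtain ⟨hf, hl⟩ := fire hc h'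
  have hfS : PySem.Str.find s "://" = (scheme.length : Int) := by rw [strfind_eq]; exact hf
  have hguard : PySem.Str.find s "://" ≠ -1 := by
    intro hh; rw [hfS] at hh; omega
  have hslice : PySem.Str.lower (PySem.Str.slice s none (some (PySem.Str.find s "://"))) =
      String.ofList scheme := by
    rw [hfS]
    unfold PySem.Str.lower PySem.Str.slice
    congr 1
    rw [String.toList_ofList, PySem.Chars.slice_eq_listSlice,
      PySem.List.slice_to _ (Int.natCast_nonneg _), Int.toNat_natCast]
    exact hl
  rw [pvBif, if_pos ⟨hguard, by rw [hslice]; exact hmem⟩]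
  have hlenp : PySem.Str.len p = (scheme.length : Int) + 3 := by
    simp [PySem.Str.len, hp]
  rw [hfS, hlenp]

-- One rejected scheme of the membership test cannot name a matching prefix.
theorem no_match (s : String) {scheme : List Char} (p : String)
    (hp : p.toList = scheme ++ [':', '/', '/'])
    (hfalse : ¬ PySem.Str.startswith (PySem.Str.lower s) p = true)
    (hnn : 0 ≤ PySem.Str.find s "://")
    (hle : (PySem.Str.find s "://").toNat ≤ s.toList.length) :
    ¬ String.ofList (PySem.Chars.lower (s.toList.take (PySem.Str.find s "://").toNat)) =
        String.ofList scheme := by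
  intro h
  have hL : PySem.Chars.lower (s.toList.take (PySem.Str.find s "://").toNat) = scheme := by
    have := congrArg String.toList h
    simpa [String.toList_ofList] using this
  have hklen : (PySem.Str.find s "://").toNat = scheme.length := by
    have := congrArg List.length hL
    simp only [PySem.Chars.lower, List.length_map, List.length_take] at this
    omega
  have hf : PySem.Str.find s "://" = (scheme.length : Int) := by
    rw [← hklen]
    exact (Int.toNat_of_nonneg hnn).symm
  exact hfalse (case_back s p hp hf (hklen ▸ hL))

theorem case_nofire (s : String)
    (h1 : ¬ PySem.Str.startswith (PySem.Str.lower s) "http://" = true)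
    (h2 : ¬ PySem.Str.startswith (PySem.Str.lower s) "https://" = true)
    (h3 : ¬ PySem.Str.startswith (PySem.Str.lower s) "socks4://" = true)
    (h4 : ¬ PySem.Str.startswith (PySem.Str.lower s) "socks5://" = true)
    (h5 : ¬ PySem.Str.startswith (PySem.Str.lower s) "socks4h://" = true)
    (h6 : ¬ PySem.Str.startswith (PySem.Str.lower s) "socks5h://" = true) :
    pvBif s = s := by
  have hcond : ¬ (PySem.Str.find s "://" ≠ -1 ∧
      pvSchemes.contains (PySem.Str.lower (PySem.Str.slice s none (some (PySem.Str.find s "://")))) = true) := by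
    rintro ⟨hne, hcont⟩
    have hnn : 0 ≤ PySem.Str.find s "://" := by
      have := PySem.Chars.neg_one_le_find s.toList [':', '/', '/']
      rw [← strfind_eq] at this
      omega
    have hle : (PySem.Str.find s "://").toNat ≤ s.toList.length := by
      have := PySem.Chars.find_le_length s.toList [':', '/', '/']
      rw [← strfind_eq] at this
      omega
    have hsl : PySem.Str.lower (PySem.Str.slice s none (some (PySem.Str.find s "://"))) =
        String.ofList (PySem.Chars.lower (s.toList.take (PySem.Str.find s "://").toNat)) := by
      show String.ofList _ = _
      refine congrArg String.ofList ?_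
      rw [PySem.Str.toList_slice, PySem.Chars.slice_eq_listSlice, PySem.List.slice_to _ hnn]
    rw [hsl] at hcont
    simp only [pvSchemes, List.contains_cons, List.contains_nil, Bool.or_eq_true, beq_iff_eq,
      Bool.or_false] at hcont
    rcases hcont with h | h | h | h | h | h
    · exact no_match (scheme := "http".toList) s "http://" (by decide) h1 hnn hle (by simpa using h)
    · exact no_match (scheme := "https".toList) s "https://" (by decide) h2 hnn hle (by simpa using h)
    · exact no_match (scheme := "socks4".toList) s "socks4://" (by decide) h3 hnn hle (by simpa using h)
    · exact no_match (scheme := "socks5".toList) s "socks5://" (by decide) h4 hnn hle (by simpa using h)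
    · exact no_match (scheme := "socks4h".toList) s "socks4h://" (by decide) h5 hnn hle (by simpa using h)
    · exact no_match (scheme := "socks5h".toList) s "socks5h://" (by decide) h6 hnn hle (by simpa using h)

  rw [pvBif, if_neg hcond]

theorem key (s : String) : parse_proxy_go s pvPrefixes = pvBif s := by
  simp only [pvPrefixes, parse_proxy_go]
  by_cases h1 : PySem.Str.startswith (PySem.Str.lower s) "http://" = true
  · rw [if_pos h1]; exact (case_fire (scheme := "http".toList) s "http://" (by decide) (by decide) (by simp [pvSchemes]) h1).symm
  rw [if_neg h1]
  by_cases h2 : PySem.Str.startswith (PySem.Str.lower s) "https://" = true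
  · rw [if_pos h2]; exact (case_fire (scheme := "https".toList) s "https://" (by decide) (by decide) (by simp [pvSchemes]) h2).symm
  rw [if_neg h2]
  by_cases h3 : PySem.Str.startswith (PySem.Str.lower s) "socks4://" = true
  · rw [if_pos h3]; exact (case_fire (scheme := "socks4".toList) s "socks4://" (by decide) (by decide) (by simp [pvSchemes]) h3).symm
  rw [if_neg h3]
  by_cases h4 : PySem.Str.startswith (PySem.Str.lower s) "socks5://" = true
  · rw [if_pos h4]; exact (case_fire (scheme := "socks5".toList) s "socks5://" (by decide) (by decide) (by simp [pvSchemes]) h4).symm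
  rw [if_neg h4]
  by_cases h5 : PySem.Str.startswith (PySem.Str.lower s) "socks4h://" = true
  · rw [if_pos h5]; exact (case_fire (scheme := "socks4h".toList) s "socks4h://" (by decide) (by decide) (by simp [pvSchemes]) h5).symm
  rw [if_neg h5]
  by_cases h6 : PySem.Str.startswith (PySem.Str.lower s) "socks5h://" = true
  · rw [if_pos h6]; exact (case_fire (scheme := "socks5h".toList) s "socks5h://" (by decide) (by decide) (by simp [pvSchemes]) h6).symm
  rw [if_neg h6]
  exact (case_nofire s h1 h2 h3 h4 h5 h6).symm

-- ===== VERDICT (by name: the statement is the Claim_ definition above) =====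
theorem parse_proxy_spec : Claim_equal_parse_proxy := by
  intro proxy _
  unfold Spec_parse_proxy
  rw [alt_eq]
  exact key _
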